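-- pv_equiv track=rewrite | github.com/fdamani/3d-printing | src/data_processing/gcode_to_train.py | cut_footer
-- ===== SOURCE A (Python) =====
-- def cut_footer(x):
-- 	'''
-- 	Return index for end of linear commands.
-- 	NOTE: this applies to slic3r + taz6 boilerplate format. heuristic: find index for second M400 command.
-- 	'''
-- 	counter = 0
-- 	for i,line in enumerate(x):
-- 		split_line = line.split("\n")
-- 		if str.startswith(split_line[0], "M400"):
-- 			counter = counter + 1
-- 			if counter == 2: # if second instance
-- 				return i-1
-- ===== SOURCE B (Python) =====
-- def cut_footer(x):
--     def find(start):
--         # index of the first matching line at or after start, or None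
--         j = start
--         while j < len(x):
--             if str.startswith(x[j].split("\n")[0], "M400"):
--                 return j
--             j += 1
--         return None
--     first = find(0)
--     if first is None:
--         return None
--     second = find(first + 1)
--     return None if second is None else second - 1
-- ===== Notes on version B (the rewrite author's own statement) =====
-- stated objective: alternative
-- what changed: Replaces the single enumerate pass with a mutating counter by two staged find-first searches: locate the index of the first M400 line, then search again from the position after it for the next one and return that second index minus 1; no counter state exists.
import Mathlib
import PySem

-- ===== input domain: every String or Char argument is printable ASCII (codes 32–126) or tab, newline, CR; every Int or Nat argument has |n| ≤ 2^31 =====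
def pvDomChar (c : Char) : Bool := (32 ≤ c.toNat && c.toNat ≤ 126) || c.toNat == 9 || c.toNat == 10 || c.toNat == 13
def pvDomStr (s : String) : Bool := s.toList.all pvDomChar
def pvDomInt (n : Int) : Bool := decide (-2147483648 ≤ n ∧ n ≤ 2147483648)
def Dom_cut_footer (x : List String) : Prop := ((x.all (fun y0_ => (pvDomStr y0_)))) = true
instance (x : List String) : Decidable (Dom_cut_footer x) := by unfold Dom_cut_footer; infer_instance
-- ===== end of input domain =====

-- B replaces A's counting loop by two staged recursive find-first searches (first hit, then next hit in the suffix); same cost, different decomposition.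

-- ===== PORT A =====
-- the shared predicate: str.startswith(line.split("\n")[0], "M400")
def pvM400 (line : String) : Bool :=
  PySem.Str.startswith (PySem.List.pyGetD ((PySem.Str.split? line "\n").getD []) 0 "") "M400"

-- the for-loop over enumerate(x) with the counter, returning i-1 at the second hit
def pvGoA : List (Int × String) → Int → Option Int
  | [], _ => none
  | (i, line) :: rest, counter =>
    if pvM400 line then
      let counter := counter + 1
      if counter = 2 then some (i - 1) else pvGoA rest counter
    else pvGoA rest counter

def cut_footer (x : List String) : Option Int :=
  pvGoA (PySem.List.enumerate x 0) 0

-- ===== PORT B =====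
-- Source B's while-loop find: index of the first matching line at or after j, or none
def pvFind (x : List String) (j : Nat) : Option Nat :=
  if h : j < x.length then
    if pvM400 x[j] then some j else pvFind x (j + 1)
  else none
termination_by x.length - j

def cut_footer_alt (x : List String) : Option Int :=
  match pvFind x 0 with
  | none => none
  | some first =>
    match pvFind x (first + 1) with
    | none => none
    | some second => some ((second : Int) - 1)

-- ===== PRECONDITION & SPEC =====
def Spec_cut_footer (x : List String) (out : Option Int) : Prop := out = cut_footer_alt x
instance (x : List String) (out : Option Int) : Decidable (Spec_cut_footer x out) := by unfold Spec_cut_footer; infer_instance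

-- ===== CLAIM =====
def Claim_equal_cut_footer : Prop := ∀ (x : List String), Dom_cut_footer x → Spec_cut_footer x (cut_footer x)

-- ===== LEMMAS AND PROOFS =====
-- pvFind x j is findIdx? on the suffix, shifted by j
theorem pvFind_eq (x : List String) (j : Nat) :
    pvFind x j = ((x.drop j).findIdx? pvM400).map (fun m => j + m) := by
  by_cases h : j < x.length
  · rw [pvFind, dif_pos h]
    have hd : x.drop j = x[j] :: x.drop (j + 1) :=
      (List.drop_eq_getElem_cons h)
    by_cases hm : pvM400 x[j] = true
    · rw [if_pos hm, hd, List.findIdx?_cons]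
      simp [hm]
    · rw [if_neg hm, pvFind_eq x (j + 1), hd]
      simp only [List.findIdx?_cons, hm, cond_false]
      cases hr : (x.drop (j + 1)).findIdx? pvM400 with
      | none => simp
      | some m => simp; omega
  · rw [pvFind, dif_neg h]
    have hnil : x.drop j = [] := List.drop_eq_nil_of_le (by omega)
    simp [hnil]
termination_by x.length - j

-- A's counting loop with counter 1 over enumerate xs k: first hit index minus one
theorem pvGoA_one (xs : List String) (k : Int) :
    pvGoA (PySem.List.enumerate xs k) 1 =
      (xs.findIdx? pvM400).map (fun m => k + m - 1) := by
  induction xs generalizing k with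
  | nil => simp [pvGoA, PySem.List.enumerate_nil]
  | cons s rest ih =>
    rw [PySem.List.enumerate_cons]
    by_cases h : pvM400 s = true
    · simp [pvGoA, h, List.findIdx?_cons]
    · cases hr : rest.findIdx? pvM400 with
      | none => simp [pvGoA, h, List.findIdx?_cons, hr, ih]
      | some m =>
        simp [pvGoA, h, List.findIdx?_cons, hr, ih]
        push_cast; ring

-- A's loop with counter 0: staged via two findIdx? searches
theorem pvGoA_zero (xs : List String) (k : Int) :
    pvGoA (PySem.List.enumerate xs k) 0 =
      match xs.findIdx? pvM400 with
      | none => none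
      | some n =>
        match (xs.drop (n + 1)).findIdx? pvM400 with
        | none => none
        | some m => some (k + n + m) := by
  induction xs generalizing k with
  | nil => simp [pvGoA, PySem.List.enumerate_nil]
  | cons s rest ih =>
    rw [PySem.List.enumerate_cons]
    by_cases h : pvM400 s = true
    · have hA : pvGoA ((k, s) :: PySem.List.enumerate rest (k + 1)) 0
          = pvGoA (PySem.List.enumerate rest (k + 1)) 1 := by
        simp [pvGoA, h]
      have hF : (s :: rest).findIdx? pvM400 = some 0 := by
        simp [List.findIdx?_cons, h]
      rw [hA, pvGoA_one rest (k + 1), hF]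
      cases hr : rest.findIdx? pvM400 with
      | none => simp [hr]
      | some m => simp [hr]; ring
    · simp only [pvGoA, h, Bool.false_eq_true, if_neg, not_false_iff, ite_false,
        List.findIdx?_cons, Bool.cond_eq_ite]
      rw [ih (k + 1)]
      cases hr : rest.findIdx? pvM400 with
      | none => simp [h]
      | some n =>
        simp only [h, Bool.false_eq_true, ite_false, Option.map_some]
        have hd : (s :: rest).drop (n + 1 + 1) = rest.drop (n + 1) := by simp
        cases h2 : (rest.drop (n + 1)).findIdx? pvM400 with
        | none => simp [hd, h2]
        | some m => simp [hd, h2]; push_cast; ring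

-- ===== VERDICT =====
theorem cut_footer_alt_eq (x : List String) :
    cut_footer_alt x =
      match x.findIdx? pvM400 with
      | none => none
      | some n =>
        match (x.drop (n + 1)).findIdx? pvM400 with
        | none => none
        | some m => some ((n : Int) + m) := by
  unfold cut_footer_alt
  rw [pvFind_eq x 0]
  simp only [List.drop_zero, Nat.zero_add, Option.map_id_fun', id]
  cases h1 : x.findIdx? pvM400 with
  | none => simp
  | some n =>
    simp only [Option.map_some]
    show (match pvFind x (n + 1) with
      | none => none
      | some second => some ((second : Int) - 1)) = _
    rw [pvFind_eq x (n + 1)]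
    cases h2 : (x.drop (n + 1)).findIdx? pvM400 with
    | none => simp
    | some m => simp; push_cast; ring

-- ===== final step =====
theorem cut_footer_spec : Claim_equal_cut_footer := by
  intro x _
  show cut_footer x = cut_footer_alt x
  rw [cut_footer, pvGoA_zero x 0, cut_footer_alt_eq]
  cases h1 : x.findIdx? pvM400 with
  | none => simp [h1]
  | some n =>
    cases h2 : (x.drop (n + 1)).findIdx? pvM400 with
    | none => simp [h1, h2]
    | some m => simp [h1, h2]
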